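-- pv_equiv track=rewrite | github.com/cms02snu/Algorithm | baekjoon/1339.py | solution
-- ===== SOURCE A (Python) =====
-- def solution(data):
--     score = {}
--     for A in data:
--         for i,a in enumerate(A):
--             if a not in score:
--                 score[a] = 10**i
--             else:
--                 score[a] += 10**i
--
--     temp = [(a,b) for a,b in score.items()]
--     temp.sort(key=lambda x:(-x[1]))
--
--     db = {}
--     for i,(a,_) in enumerate(temp):
--         db[a] = 9-i
--
--     result = 0
--     for A in data:
--         for i,a in enumerate(A):
--             result += 10**i * db[a]
--
--     return result
-- ===== SOURCE B (Python) =====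
-- def solution(data):
--     score = {}
--     for word in data:
--         for i, ch in enumerate(word):
--             score[ch] = score.get(ch, 0) + 10 ** i
--     pairs = sorted(score.items(), key=lambda x: (-x[1]))
--     return sum(w * (9 - i) for i, (_, w) in enumerate(pairs))
-- ===== Notes on version B (the rewrite author's own statement) =====
-- stated objective: simpler
-- what changed: B drops A's rank table `db` and A's second double loop over the raw input: after building the same weight dict and the same descending sort, the answer is read off the sorted pairs directly as sum(weight * (9 - rank)).
import Mathlib
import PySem

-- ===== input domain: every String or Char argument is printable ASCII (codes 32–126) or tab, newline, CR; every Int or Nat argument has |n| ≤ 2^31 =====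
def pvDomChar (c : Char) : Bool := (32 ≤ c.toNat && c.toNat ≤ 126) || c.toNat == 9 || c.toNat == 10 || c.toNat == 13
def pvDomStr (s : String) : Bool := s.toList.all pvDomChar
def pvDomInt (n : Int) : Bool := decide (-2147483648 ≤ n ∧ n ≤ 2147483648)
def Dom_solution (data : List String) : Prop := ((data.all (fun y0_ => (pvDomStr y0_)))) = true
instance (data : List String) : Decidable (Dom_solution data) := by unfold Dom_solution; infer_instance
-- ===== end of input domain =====

-- B drops A's rank table `db` and A's second double loop over the raw input: the answer is read
-- directly off the sorted (letter, weight) pairs as sum(weight * (9 - rank)); objective: simpler.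

-- ===== PORT A =====
def solution (data : List String) : Int :=
  let score : PySem.Dict Char Int :=
    data.foldl (fun score A =>
      (PySem.List.enumerate A.toList).foldl (fun score p =>
        if score.contains p.2 = false then score.insert p.2 ((10 : Int) ^ p.1.toNat)
        else score.insert p.2 (score.getD p.2 0 + (10 : Int) ^ p.1.toNat)) score)
      PySem.Dict.empty
  let temp : List (Char × Int) := PySem.List.sorted score.items (fun x => -x.2)
  let db : PySem.Dict Char Int :=
    (PySem.List.enumerate temp).foldl (fun db p => db.insert p.2.1 (9 - p.1)) PySem.Dict.empty
  -- db[a]: the key is always present (every char of data is a key of score, temp is a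
  -- permutation of score.items), so Python never raises here and getD's default is never used
  data.foldl (fun result A =>
    (PySem.List.enumerate A.toList).foldl (fun result p =>
      result + (10 : Int) ^ p.1.toNat * db.getD p.2 0) result) 0

-- ===== PORT B =====
def solution_alt (data : List String) : Int :=
  let score : PySem.Dict Char Int :=
    data.foldl (fun score word =>
      (PySem.List.enumerate word.toList).foldl (fun score p =>
        score.insert p.2 (score.getD p.2 0 + (10 : Int) ^ p.1.toNat)) score)
      PySem.Dict.empty
  let pairs : List (Char × Int) := PySem.List.sorted score.items (fun x => -x.2)
  ((PySem.List.enumerate pairs).map (fun q => q.2.2 * (9 - q.1))).sum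

-- ===== PRECONDITION & SPEC =====
def Spec_solution (data : List String) (out : Int) : Prop := out = solution_alt data
instance (data : List String) (out : Int) : Decidable (Spec_solution data out) := by unfold Spec_solution; infer_instance

-- ===== CLAIM (what is proved, stated in full; the proofs are below) =====
def Claim_equal_solution : Prop := ∀ (data : List String), Dom_solution data → Spec_solution data (solution data)

-- ===== LEMMAS AND PROOFS =====

-- the flattened stream of (letter, 10^position) contributions
def pvOcc (data : List String) : List (Char × Int) :=
  data.flatMap (fun A => (PySem.List.enumerate A.toList).map (fun p => (p.2, (10 : Int) ^ p.1.toNat)))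

-- the accumulation step shared (after normalisation) by both score-building loops
def pvStep (d : PySem.Dict Char Int) (q : Char × Int) : PySem.Dict Char Int :=
  d.insert q.1 (d.getD q.1 0 + q.2)

-- the score dict both programs build, as a single fold over the contribution stream
def pvScore (data : List String) : PySem.Dict Char Int :=
  (pvOcc data).foldl pvStep PySem.Dict.empty

lemma scoreB_eq (data : List String) :
    data.foldl (fun score word =>
      (PySem.List.enumerate word.toList).foldl (fun score p =>
        score.insert p.2 (score.getD p.2 0 + (10 : Int) ^ p.1.toNat)) score)
      PySem.Dict.empty = pvScore data := by
  simp [pvScore, pvOcc, List.foldl_flatMap, List.foldl_map, pvStep]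

lemma scoreA_eq (data : List String) :
    data.foldl (fun score A =>
      (PySem.List.enumerate A.toList).foldl (fun score p =>
        if score.contains p.2 = false then score.insert p.2 ((10 : Int) ^ p.1.toNat)
        else score.insert p.2 (score.getD p.2 0 + (10 : Int) ^ p.1.toNat)) score)
      PySem.Dict.empty = pvScore data := by
  rw [← scoreB_eq]
  have h : (fun (score : PySem.Dict Char Int) (p : Int × Char) =>
      if score.contains p.2 = false then score.insert p.2 ((10 : Int) ^ p.1.toNat)
      else score.insert p.2 (score.getD p.2 0 + (10 : Int) ^ p.1.toNat)) =
      (fun (score : PySem.Dict Char Int) (p : Int × Char) =>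
        score.insert p.2 (score.getD p.2 0 + (10 : Int) ^ p.1.toNat)) := by
    funext sc p
    by_cases h : sc.contains p.2
    · simp [h]
    · simp only [Bool.not_eq_true] at h
      simp [h, PySem.Dict.getD_of_not_contains _ _ h]
  rw [h]

lemma nodup_keys_pvScore (data : List String) : (pvScore data).keys.Nodup := by
  unfold pvScore pvStep
  exact PySem.Dict.nodup_keys_foldl_insert_key _ Prod.fst _ _
    (by simp [PySem.Dict.keys_empty])

-- one in-place value update of an association list with distinct keys shifts the weighted sum by w * f k
lemma sum_map_update (f : Char → Int) (k : Char) (v₀ w : Int) :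
    ∀ (l : List (Char × Int)), (l.map Prod.fst).Nodup → (k, v₀) ∈ l →
    ((l.map (fun p => if p.1 == k then (k, v₀ + w) else p)).map (fun q => q.2 * f q.1)).sum
      = (l.map (fun q => q.2 * f q.1)).sum + w * f k := by
  intro l
  induction l with
  | nil => intro _ h; cases h
  | cons a l ih =>
    intro hnd hmem
    simp only [List.map_cons, List.nodup_cons, List.mem_map] at hnd
    by_cases hk : a.1 = k
    · -- head is the unique entry with key k, and it must be (k, v₀)
      have hknot : ∀ p ∈ l, p.1 ≠ k := by
        intro p hp he; exact hnd.1 ⟨p, hp, by rw [he, hk]⟩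
      have ha : a = (k, v₀) := by
        rcases List.mem_cons.mp hmem with h | h
        · exact h.symm
        · exact absurd rfl (hknot _ h)
      have htail : l.map (fun p => if p.1 == k then (k, v₀ + w) else p) = l := by
        conv_rhs => rw [← List.map_id l]
        apply List.map_congr_left
        intro p hp
        simp [hknot p hp]
      rw [List.map_cons, htail, List.map_cons, List.sum_cons, List.map_cons, List.sum_cons]
      have hhead : (if (a.1 == k) = true then (k, v₀ + w) else a) = (k, v₀ + w) := by
        simp [hk]
      rw [hhead, ha]
      ring
    · have hmem' : (k, v₀) ∈ l := by
        rcases List.mem_cons.mp hmem with h | h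
        · exact absurd (congrArg Prod.fst h.symm) hk
        · exact h
      have hne : (a.1 == k) = false := beq_eq_false_iff_ne.mpr hk
      simp only [List.map_cons, hne, Bool.false_eq_true, if_false, List.sum_cons,
        ih hnd.2 hmem']
      ring

-- weighted sum over the items of the accumulated dict = weighted sum over the raw contributions
lemma sum_items_foldl (f : Char → Int) :
    ∀ (l : List (Char × Int)) (d : PySem.Dict Char Int), d.keys.Nodup →
    (((l.foldl pvStep d).items.map (fun q => q.2 * f q.1)).sum
      = (d.items.map (fun q => q.2 * f q.1)).sum + (l.map (fun q => q.2 * f q.1)).sum) := by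
  intro l
  induction l with
  | nil => intro d _; simp
  | cons q l ih =>
    intro d hnd
    have hkeys : (pvStep d q).keys.Nodup := by
      have := PySem.Dict.nodup_keys_foldl_insert_key [q] Prod.fst
        (fun d x => d.getD x.1 0 + x.2) d hnd
      simpa [pvStep] using this
    rw [List.foldl_cons, ih (pvStep d q) hkeys]
    have hstep : ((pvStep d q).items.map (fun p => p.2 * f p.1)).sum
        = (d.items.map (fun p => p.2 * f p.1)).sum + q.2 * f q.1 := by
      by_cases hc : d.contains q.1
      · rw [pvStep, PySem.Dict.items_insert_of_contains d _ hc]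
        obtain ⟨v₀, hv₀⟩ : ∃ v, (q.1, v) ∈ d.items := by
          have := PySem.Dict.contains_eq_isSome_get? d q.1
          rw [hc] at this
          obtain ⟨v, hv⟩ := Option.isSome_iff_exists.mp this.symm
          exact ⟨v, (PySem.Dict.get?_eq_some_iff_mem_items d q.1 v hnd).mp hv⟩
        have hget : d.getD q.1 0 = v₀ := PySem.Dict.getD_of_mem_items d hv₀ hnd 0
        rw [hget]
        exact sum_map_update f q.1 v₀ q.2 d.items hnd hv₀
      · simp only [Bool.not_eq_true] at hc
        rw [pvStep, PySem.Dict.items_insert_of_not_contains d _ hc,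
          PySem.Dict.getD_of_not_contains _ _ hc]
        simp [List.sum_append]
    rw [hstep]
    simp only [List.map_cons, List.sum_cons]
    ring

-- A's final double loop, rewritten as the weighted sum over the contribution stream
lemma resultA_eq (data : List String) (g : Char → Int) :
    data.foldl (fun result A =>
      (PySem.List.enumerate A.toList).foldl (fun result p =>
        result + (10 : Int) ^ p.1.toNat * g p.2) result) 0
      = ((pvOcc data).map (fun q => q.2 * g q.1)).sum := by
  have hinner : ∀ (r : Int) (A : String),
      (PySem.List.enumerate A.toList).foldl (fun result p =>
        result + (10 : Int) ^ p.1.toNat * g p.2) r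
      = r + ((PySem.List.enumerate A.toList).map (fun p => (10 : Int) ^ p.1.toNat * g p.2)).sum :=
    fun r A => PySem.List.foldl_add _ _ _
  rw [PySem.List.foldl_congr_mem data _
    (fun result A => result +
      ((PySem.List.enumerate A.toList).map (fun p => (10 : Int) ^ p.1.toNat * g p.2)).sum) 0
    (fun r A _ => hinner r A), PySem.List.foldl_add]
  simp only [pvOcc, List.map_flatMap, zero_add]
  induction data with
  | nil => rfl
  | cons A data ih =>
    simp only [List.map_cons, List.sum_cons, List.flatMap_cons, List.sum_append, ih]
    congr 1
    rw [List.map_map]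
    rfl

-- the rank dict db: looking up the i-th sorted letter yields 9 - i
lemma db_getD (temp : List (Char × Int)) (hnd : (temp.map Prod.fst).Nodup)
    (e : Int × (Char × Int)) (he : e ∈ PySem.List.enumerate temp) :
    ((PySem.List.enumerate temp).foldl (fun db p => db.insert p.2.1 (9 - p.1))
      PySem.Dict.empty).getD e.2.1 0 = 9 - e.1 := by
  have hmapkeys : (PySem.List.enumerate temp).map (fun p => p.2.1) = temp.map Prod.fst := by
    rw [show (fun (p : Int × (Char × Int)) => p.2.1) = Prod.fst ∘ Prod.snd from rfl,
      ← List.map_map, PySem.List.map_snd_enumerate]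
  have hitems := PySem.Dict.items_foldl_insert_fresh (PySem.List.enumerate temp)
    (fun p => p.2.1) (fun p => 9 - p.1) PySem.Dict.empty
    (fun a _ => PySem.Dict.contains_empty _) (by rw [hmapkeys]; exact hnd)
  apply PySem.Dict.getD_of_mem_items
  · rw [hitems]
    simp only [PySem.Dict.empty, List.nil_append, List.mem_map]
    exact ⟨e, he, rfl⟩
  · have : ((PySem.List.enumerate temp).foldl (fun db p => db.insert p.2.1 (9 - p.1))
        PySem.Dict.empty).keys = temp.map Prod.fst := by
      unfold PySem.Dict.keys
      rw [hitems]
      simp only [PySem.Dict.empty, List.nil_append, List.map_map]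
      exact hmapkeys
    rw [this]; exact hnd

lemma solution_eq_alt (data : List String) : solution data = solution_alt data := by
  unfold solution solution_alt
  rw [scoreA_eq, scoreB_eq]
  set temp := PySem.List.sorted (pvScore data).items (fun x => -x.2) with htemp
  set db := (PySem.List.enumerate temp).foldl (fun db p => db.insert p.2.1 (9 - p.1))
    PySem.Dict.empty with hdb
  have hndtemp : (temp.map Prod.fst).Nodup := by
    have hperm : (temp.map Prod.fst).Perm ((pvScore data).items.map Prod.fst) :=
      (PySem.List.sorted_perm _ _ _).map Prod.fst
    exact hperm.nodup_iff.mpr (nodup_keys_pvScore data)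
  rw [resultA_eq data (fun a => db.getD a 0)]
  have h1 : ((pvOcc data).map (fun q => q.2 * db.getD q.1 0)).sum
      = ((pvScore data).items.map (fun q => q.2 * db.getD q.1 0)).sum := by
    have := sum_items_foldl (fun a => db.getD a 0) (pvOcc data) PySem.Dict.empty
      (by simp [PySem.Dict.keys_empty])
    rw [show (pvOcc data).foldl pvStep PySem.Dict.empty = pvScore data from rfl] at this
    simp only [PySem.Dict.empty, List.map_nil, List.sum_nil, zero_add] at this
    exact this.symm
  have h2 : (((pvScore data).items.map (fun q => q.2 * db.getD q.1 0)).sum)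
      = ((temp.map (fun q => q.2 * db.getD q.1 0)).sum) :=
    (((PySem.List.sorted_perm _ _ _).map _).sum_eq).symm
  have h3 : (temp.map (fun q => q.2 * db.getD q.1 0)).sum
      = ((PySem.List.enumerate temp).map (fun q => q.2.2 * (9 - q.1))).sum := by
    conv_lhs => rw [← PySem.List.map_snd_enumerate temp 0, List.map_map]
    congr 1
    apply List.map_congr_left
    intro e he
    simp only [Function.comp]
    rw [db_getD temp hndtemp e he]
  rw [h1, h2, h3]

-- ===== VERDICT (by name: the statement is the Claim_ definition above) =====
theorem solution_spec : Claim_equal_solution := by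
  intro data _
  unfold Spec_solution
  exact solution_eq_alt data
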